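-- pv_equiv track=rewrite | github.com/jparta/ReversoContextOneToOne | main.py | part_of_speech_equivalence
-- ===== SOURCE A (Python) =====
-- import itertools
--
-- def part_of_speech_equivalence(pos1: str, pos2: str) -> bool:
--     # Returns True if the two parts of speech are equivalent
--     def _equivalent(_pos1: str, _pos2: str) -> bool:
--         equivalence_classes = [
--             ("nn.", "nm.", "nf.", "n.", "npl.", "nnpl.", "nmpl.", "nfpl."),
--         ]
--         if _pos1 == _pos2:
--             return True
--         for equivalence_class in equivalence_classes:
--             if _pos1 in equivalence_class and _pos2 in equivalence_class:
--                 return True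
--         return False
--
--     if (
--         pos1 is None
--         or pos2 is None
--         or (isinstance(pos1, str) and pos1.strip() == "")
--         or (isinstance(pos2, str) and pos2.strip() == "")
--     ):
--         return False
--     pos1_list = pos1.split("/")
--     pos2_list = pos2.split("/")
--     for pos1, pos2 in itertools.product(pos1_list, pos2_list):
--         if not _equivalent(pos1, pos2):
--             return False
--     return True
-- ===== SOURCE B (Python) =====
-- _NOUN = object()  # unique sentinel: cannot collide with any string element
-- _NOUN_CLASS = frozenset(("nn.", "nm.", "nf.", "n.", "npl.", "nnpl.", "nmpl.", "nfpl."))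
--
--
-- def _keys(s):
--     # canonical keys of one POS string, or None if the None/blank guard fails
--     if s is None or s.strip() == "":
--         return None
--     return [(_NOUN if e in _NOUN_CLASS else e) for e in s.split("/")]
--
--
-- def part_of_speech_equivalence(pos1: str, pos2: str) -> bool:
--     k1 = _keys(pos1)
--     k2 = _keys(pos2)
--     if k1 is None or k2 is None:
--         return False
--     first, *rest = k1 + k2
--     return all(k == first for k in rest)
-- ===== Notes on version B (the rewrite author's own statement) =====
-- stated objective: alternative
-- what changed: Replaces the nested all-pairs scan over the cross product of the two split lists by per-string canonicalization (noun-class members map to one unique sentinel) followed by a single pass checking every canonical key equals the first.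
import Mathlib
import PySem

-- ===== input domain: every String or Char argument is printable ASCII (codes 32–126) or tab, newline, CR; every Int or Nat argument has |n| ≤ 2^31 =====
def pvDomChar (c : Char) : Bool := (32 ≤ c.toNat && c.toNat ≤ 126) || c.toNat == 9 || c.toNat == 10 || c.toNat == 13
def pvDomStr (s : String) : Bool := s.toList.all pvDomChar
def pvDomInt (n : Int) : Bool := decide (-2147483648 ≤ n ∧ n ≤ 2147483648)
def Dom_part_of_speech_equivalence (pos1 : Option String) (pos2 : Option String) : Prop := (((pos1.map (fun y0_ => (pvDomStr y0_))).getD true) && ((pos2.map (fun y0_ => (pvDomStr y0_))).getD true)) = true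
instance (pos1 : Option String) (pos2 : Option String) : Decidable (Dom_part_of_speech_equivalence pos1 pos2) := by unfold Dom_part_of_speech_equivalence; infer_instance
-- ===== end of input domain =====

-- B replaces A's nested scan over the cross product of the two split lists by per-string
-- canonicalization (noun-class members map to one sentinel) plus a single pass checking
-- that every canonical key equals the first.

-- ===== PORT A =====
-- the single equivalence class of A's inner helper
def pseClasses : List (List String) :=
  [["nn.", "nm.", "nf.", "n.", "npl.", "nnpl.", "nmpl.", "nfpl."]]

-- inner helper _equivalent
def pseEquivalent (p1 p2 : String) : Bool :=
  if p1 == p2 then true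
  else if pseClasses.any (fun cls => cls.contains p1 && cls.contains p2) then true
  else false

def part_of_speech_equivalence (pos1 : Option String) (pos2 : Option String) : Bool :=
  match pos1, pos2 with
  | none, _ => false
  | _, none => false
  | some p1, some p2 =>
    if PySem.Str.strip p1 == "" || PySem.Str.strip p2 == "" then false
    else
      let pos1_list := (PySem.Str.split? p1 "/").getD []
      let pos2_list := (PySem.Str.split? p2 "/").getD []
      -- itertools.product + early return False = all pairs satisfy _equivalent
      (pos1_list.flatMap (fun x => pos2_list.map (fun y => (x, y)))).all
        (fun p => pseEquivalent p.1 p.2)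

-- ===== PORT B =====
def pseNounClass : List String := ["nn.", "nm.", "nf.", "n.", "npl.", "nnpl.", "nmpl.", "nfpl."]

-- canonical key of one element: 'none' is the sentinel for the noun class (Python's unique object())
def pseCanon (e : String) : Option String :=
  if pseNounClass.contains e then none else some e

-- _keys: canonical keys of one POS string, or 'none' if the None/blank guard fails
def pseKeys : Option String → Option (List (Option String))
  | Option.none => Option.none
  | Option.some s =>
    if PySem.Str.strip s == "" then Option.none
    else Option.some (((PySem.Str.split? s "/").getD []).map pseCanon)

def part_of_speech_equivalence_alt (pos1 : Option String) (pos2 : Option String) : Bool :=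
  match pseKeys pos1, pseKeys pos2 with
  | Option.some k1, Option.some k2 =>
    match k1 ++ k2 with
    | [] => true
    | first :: rest => rest.all (fun k => k == first)
  | _, _ => false

-- ===== PRECONDITION & SPEC =====
def Spec_part_of_speech_equivalence (pos1 : Option String) (pos2 : Option String) (out : Bool) : Prop := out = part_of_speech_equivalence_alt pos1 pos2
instance (pos1 : Option String) (pos2 : Option String) (out : Bool) : Decidable (Spec_part_of_speech_equivalence pos1 pos2 out) := by unfold Spec_part_of_speech_equivalence; infer_instance

-- ===== CLAIM (what is proved, stated in full; the proofs are below) =====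
def Claim_equal_part_of_speech_equivalence : Prop := ∀ (pos1 : Option String) (pos2 : Option String), Dom_part_of_speech_equivalence pos1 pos2 → Spec_part_of_speech_equivalence pos1 pos2 (part_of_speech_equivalence pos1 pos2)

-- ===== LEMMAS AND PROOFS =====

-- s.split(sep) always yields at least one piece
theorem pse_go_len (sep : List Char) : ∀ (fuel : Nat) (l cur : List Char) (acc : List (List Char)),
    acc.length < (PySem.Chars.splitOn.go sep fuel l cur acc).length := by
  intro fuel
  induction fuel with
  | zero => intro l cur acc; simp [PySem.Chars.splitOn.go]
  | succ n ih =>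
    intro l cur acc
    match l with
    | [] => simp [PySem.Chars.splitOn.go]
    | c :: rest =>
      rw [PySem.Chars.splitOn.go]
      split
      · exact Nat.lt_trans (Nat.lt_succ_self _) (by simpa using ih _ _ (cur.reverse :: acc))
      · exact ih _ _ _

theorem pse_split_ne_nil (s : String) : (PySem.Str.split? s "/").getD [] ≠ [] := by
  have hrfl : PySem.Str.split? s "/"
      = some ((PySem.Chars.splitOn s.toList ['/']).map String.ofList) := rfl
  rw [hrfl, Option.getD_some]
  intro hnil
  rw [List.map_eq_nil_iff] at hnil
  have hlen := pse_go_len ['/'] (s.toList.length + 1) s.toList [] []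
  rw [PySem.Chars.splitOn] at hnil
  rw [show s.toList.length = s.length from by simp] at hnil
  simp [hnil] at hlen

theorem pse_equiv_eq_canon (x y : String) :
    pseEquivalent x y = (pseCanon x == pseCanon y) := by
  by_cases hx : pseNounClass.contains x = true <;>
  by_cases hy : pseNounClass.contains y = true <;>
  by_cases hxy : x = y <;>
  simp_all [pseEquivalent, pseCanon, pseClasses, pseNounClass]

theorem pse_key (l1 l2 : List String) (h1 : l1 ≠ []) (h2 : l2 ≠ []) :
    ((l1.flatMap (fun x => l2.map (fun y => (x, y)))).all (fun p => pseEquivalent p.1 p.2))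
      = (match (l1 ++ l2).map pseCanon with
         | [] => true
         | first :: rest => rest.all (fun k => k == first)) := by
  obtain ⟨x0, t1, rfl⟩ := List.exists_cons_of_ne_nil h1
  obtain ⟨y0, hy0⟩ := List.exists_mem_of_ne_nil l2 h2
  rw [Bool.eq_iff_iff]
  have hA : (((x0 :: t1).flatMap (fun x => l2.map (fun y => (x, y)))).all
        (fun p => pseEquivalent p.1 p.2)) = true
      ↔ ∀ x ∈ x0 :: t1, ∀ y ∈ l2, pseCanon x = pseCanon y := by
    simp only [List.all_eq_true, List.mem_flatMap, List.mem_map]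
    constructor
    · intro h x hx y hy
      have := h (x, y) ⟨x, hx, y, hy, rfl⟩
      rw [pse_equiv_eq_canon] at this
      exact eq_of_beq this
    · rintro h p ⟨x, hx, y, hy, rfl⟩
      rw [pse_equiv_eq_canon]
      exact beq_iff_eq.mpr (h x hx y hy)
  rw [hA]
  simp only [List.cons_append, List.map_cons, List.all_eq_true, List.mem_map,
    List.mem_append, beq_iff_eq]
  constructor
  · rintro h _ ⟨z, hz, rfl⟩
    rcases hz with hz | hz
    · exact (h z (List.mem_cons_of_mem x0 hz) y0 hy0).trans
        (h x0 (List.mem_cons_self) y0 hy0).symm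
    · exact (h x0 (List.mem_cons_self) z hz).symm
  · intro h x hx y hy
    have hyk : pseCanon y = pseCanon x0 := h _ ⟨y, Or.inr hy, rfl⟩
    rcases List.mem_cons.mp hx with rfl | hx
    · exact hyk.symm
    · exact (h _ ⟨x, Or.inl hx, rfl⟩).trans hyk.symm

-- ===== VERDICT (by name: the statement is the Claim_ definition above) =====
theorem part_of_speech_equivalence_spec : Claim_equal_part_of_speech_equivalence := by
  intro pos1 pos2 _
  unfold Spec_part_of_speech_equivalence
  cases pos1 with
  | none => rfl
  | some p1 =>
    cases pos2 with
    | none =>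
      simp [part_of_speech_equivalence, part_of_speech_equivalence_alt, pseKeys]
    | some p2 =>
      unfold part_of_speech_equivalence part_of_speech_equivalence_alt pseKeys
      by_cases h1 : (PySem.Str.strip p1 == "") = true
      · simp [h1]
      · by_cases h2 : (PySem.Str.strip p2 == "") = true
        · simp [h1, h2]
        · simp only [Bool.not_eq_true] at h1 h2
          simp only [h1, h2, Bool.or_self, Bool.false_eq_true, if_false]
          rw [← List.map_append]
          exact pse_key _ _ (pse_split_ne_nil p1) (pse_split_ne_nil p2)
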